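-- pv_equiv track=rewrite | github.com/Kefka174/Advent-of-Code | 2024/day06/solution.py | mapObstructions
-- ===== SOURCE A (Python) =====
-- def mapObstructions(obstructionChar: str, matrix: list[list[str]]) -> tuple[list[list[int]], list[list[int]]]:
--     rowObstructions = [[] for _ in range(len(matrix))]
--     colObstructions = [[] for _ in range(len(matrix[0]))]
--     for rowNum in range(len(matrix)):
--         for colNum in range(len(matrix[0])):
--             if matrix[rowNum][colNum] == obstructionChar:
--                 rowObstructions[rowNum].append(colNum)
--                 colObstructions[colNum].append(rowNum)
--     return rowObstructions, colObstructions
-- ===== SOURCE B (Python) =====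
-- def mapObstructions(obstructionChar: str, matrix: list[list[str]]) -> tuple[list[list[int]], list[list[int]]]:
--     width = len(matrix[0])
--     hits = [(r, c) for r in range(len(matrix)) for c in range(width)
--             if matrix[r][c] == obstructionChar]
--     rowObstructions = [[c for (r, c) in hits if r == row] for row in range(len(matrix))]
--     colObstructions = [[r for (r, c) in hits if c == col] for col in range(width)]
--     return rowObstructions, colObstructions
-- ===== Notes on version B (the rewrite author's own statement) =====
-- stated objective: alternative
-- what changed: A fills row and column buckets in place while scanning every cell in one nested loop; B first extracts a flat list of hit coordinates and then builds every row bucket and every column bucket as a filter of that coordinate list, with no in-place appends at all.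
import Mathlib
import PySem

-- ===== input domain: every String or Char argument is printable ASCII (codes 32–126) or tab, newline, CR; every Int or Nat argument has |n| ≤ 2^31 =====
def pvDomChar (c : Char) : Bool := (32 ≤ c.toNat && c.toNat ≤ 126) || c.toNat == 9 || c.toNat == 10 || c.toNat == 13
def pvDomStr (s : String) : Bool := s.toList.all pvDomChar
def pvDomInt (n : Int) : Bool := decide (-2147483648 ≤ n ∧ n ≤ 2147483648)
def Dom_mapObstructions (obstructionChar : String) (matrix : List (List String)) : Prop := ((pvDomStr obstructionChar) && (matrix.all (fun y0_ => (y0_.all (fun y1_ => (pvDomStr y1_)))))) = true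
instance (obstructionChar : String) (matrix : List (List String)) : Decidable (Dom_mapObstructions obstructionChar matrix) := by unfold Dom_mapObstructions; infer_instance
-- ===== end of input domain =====

-- B extracts a flat list of hit coordinates once and then builds every row and column
-- bucket as a filter of that coordinate list, instead of A's in-place appends during
-- one nested scan; alternative decomposition, same output.

-- ===== PORT A =====
-- one nested index loop over all cells, appending into both bucket lists in place
def mapObstructions (obstructionChar : String) (matrix : List (List String)) : List (List Int) × List (List Int) :=
  let rowObstructions : List (List Int) := List.replicate matrix.length []
  let colObstructions : List (List Int) := List.replicate (matrix.headD []).length []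
  (List.range matrix.length).foldl (fun st rowNum =>
    (List.range (matrix.headD []).length).foldl (fun st colNum =>
      if ((matrix.getD rowNum []).getD colNum "") == obstructionChar then
        (st.1.modify rowNum (fun xs => xs ++ [(colNum : Int)]),
         st.2.modify colNum (fun xs => xs ++ [(rowNum : Int)]))
      else st) st) (rowObstructions, colObstructions)

-- ===== PORT B =====
-- flat list of hit coordinates first, then each bucket is a filter of that list
def mapObstructions_alt (obstructionChar : String) (matrix : List (List String)) : List (List Int) × List (List Int) :=
  let width := (matrix.headD []).length
  let hits : List (Nat × Nat) :=
    (List.range matrix.length).flatMap (fun r =>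
      ((List.range width).filter (fun c => (matrix.getD r []).getD c "" == obstructionChar)).map
        (fun c => (r, c)))
  let rowObstructions : List (List Int) := (List.range matrix.length).map (fun row =>
    (hits.filter (fun p => p.1 == row)).map (fun p => (p.2 : Int)))
  let colObstructions : List (List Int) := (List.range width).map (fun col =>
    (hits.filter (fun p => p.2 == col)).map (fun p => (p.1 : Int)))
  (rowObstructions, colObstructions)

-- ===== PRECONDITION & SPEC =====
-- Pre_ is exactly where Python A returns: a nonempty matrix whose every row is at least as
-- long as the first row (otherwise matrix[0] or matrix[rowNum][colNum] raises IndexError).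
def Pre_mapObstructions (obstructionChar : String) (matrix : List (List String)) : Prop :=
  matrix ≠ [] ∧ ∀ row ∈ matrix, (matrix.headD []).length ≤ row.length
instance (obstructionChar : String) (matrix : List (List String)) : Decidable (Pre_mapObstructions obstructionChar matrix) := by unfold Pre_mapObstructions; infer_instance
def pvWitness_mapObstructions : String × List (List String) := ("#", [["#", "."], [".", "#"]])
def Spec_mapObstructions (obstructionChar : String) (matrix : List (List String)) (out : List (List Int) × List (List Int)) : Prop := out = mapObstructions_alt obstructionChar matrix
instance (obstructionChar : String) (matrix : List (List String)) (out : List (List Int) × List (List Int)) : Decidable (Spec_mapObstructions obstructionChar matrix out) := by unfold Spec_mapObstructions; infer_instance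

-- ===== CLAIM (what is proved, stated in full; the proofs are below) =====
def Claim_equal_mapObstructions : Prop := ∀ (obstructionChar : String) (matrix : List (List String)), Dom_mapObstructions obstructionChar matrix → Pre_mapObstructions obstructionChar matrix → Spec_mapObstructions obstructionChar matrix (mapObstructions obstructionChar matrix)

-- ===== LEMMAS AND PROOFS =====

-- a fold whose step acts componentwise on a pair splits into two folds
theorem pv_foldl_pair {γ : Type} (xs : List γ)
    (fR : List (List Int) → γ → List (List Int)) (fC : List (List Int) → γ → List (List Int))
    (R C : List (List Int)) :
    xs.foldl (fun st x => (fR st.1 x, fC st.2 x)) (R, C) = (xs.foldl fR R, xs.foldl fC C) := by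
  induction xs generalizing R C with
  | nil => rfl
  | cons x xs ih => simp [List.foldl_cons, ih]

-- successive appends into the SAME bucket compose into one append of the whole list
theorem pv_foldl_modify_same (ds : List Int) (r : Nat) (R : List (List Int)) :
    ds.foldl (fun R c => R.modify r (fun xs => xs ++ [c])) R
      = R.modify r (fun xs => xs ++ ds) := by
  induction ds generalizing R with
  | nil =>
      simp only [List.foldl_nil, List.append_nil]
      exact (List.modify_id r R).symm
  | cons d ds ih =>
      simp only [List.foldl_cons, ih, List.modify_modify_eq]
      congr 1; funext xs; simp [Function.comp]

theorem pv_modify_append_left (l l' : List (List Int)) (f : List Int → List Int) :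
    ∀ i, i < l.length → (l ++ l').modify i f = l.modify i f ++ l' := by
  induction l with
  | nil => intro i h; simp at h
  | cons a l ih =>
      intro i h
      cases i with
      | zero => simp [List.modify_zero_cons]
      | succ i =>
          simp only [List.cons_append, List.modify_succ_cons]
          rw [ih i (by simpa using h)]

theorem pv_modify_append_last (l : List (List Int)) (x : List Int) (f : List Int → List Int) :
    (l ++ [x]).modify l.length f = l ++ [f x] := by
  induction l with
  | nil => rfl
  | cons a l ih => simp [List.modify_succ_cons, ih]

-- modifies at indices < n leave an appended tail untouched
theorem pv_rowfold_append (g : Nat → List Int) (n : Nat) (R : List (List Int)) (x : List Int)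
    (h : n ≤ R.length) :
    (List.range n).foldl (fun R r => R.modify r (fun xs => xs ++ g r)) (R ++ [x])
      = (List.range n).foldl (fun R r => R.modify r (fun xs => xs ++ g r)) R ++ [x] := by
  induction n with
  | zero => rfl
  | succ n ih =>
      have hlen : ((List.range n).foldl (fun R r => R.modify r (fun xs => xs ++ g r)) R).length
          = R.length := by
        clear ih h
        induction (List.range n) generalizing R with
        | nil => rfl
        | cons y ys ih2 => simp [List.foldl_cons, ih2, List.length_modify]
      rw [List.range_succ, List.foldl_append, List.foldl_append]
      rw [ih (Nat.le_of_succ_le h)]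
      simp only [List.foldl_cons, List.foldl_nil]
      rw [pv_modify_append_left _ _ _ n (by rw [hlen]; omega)]

-- the row-bucket loop on fresh buckets produces exactly the per-row hit lists
theorem pv_rowfold (g : Nat → List Int) (n : Nat) :
    (List.range n).foldl (fun R r => R.modify r (fun xs => xs ++ g r)) (List.replicate n [])
      = (List.range n).map g := by
  induction n with
  | zero => rfl
  | succ n ih =>
      rw [List.range_succ, List.foldl_append, List.replicate_succ',
        pv_rowfold_append g n _ _ (by simp), ih]
      simp only [List.foldl_cons, List.foldl_nil]
      have := pv_modify_append_last ((List.range n).map g) [] (fun xs => xs ++ g n)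
      simp only [List.length_map, List.length_range] at this
      rw [this]
      simp

-- the flat hit list restricted to one row is that row's hit columns, tagged with the row
theorem pv_filter_hits_row (g : Nat → List Nat) (n r : Nat) (hr : r < n) :
    (((List.range n).flatMap (fun r' => (g r').map (fun c => (r', c)))).filter
        (fun p => p.1 == r))
      = (g r).map (fun c => (r, c)) := by
  induction n with
  | zero => omega
  | succ n ih =>
      rw [List.range_succ, List.flatMap_append, List.filter_append]
      by_cases h : r = n
      · subst h
        have h1 : (((List.range r).flatMap (fun r' => (g r').map (fun c => (r', c)))).filter
            (fun p => p.1 == r)) = [] := by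
          rw [List.filter_eq_nil_iff]
          intro p hp
          simp only [List.mem_flatMap, List.mem_range, List.mem_map] at hp
          obtain ⟨r', hr', c, _, rfl⟩ := hp
          simp; omega
        rw [h1, List.nil_append, List.flatMap_singleton, List.filter_map]
        congr 1
        apply List.filter_eq_self.mpr
        intro c _
        simp [Function.comp]
      · have hr' : r < n := by omega
        rw [ih hr']
        have h2 : (((g n).map (fun c => (n, c))).filter (fun p => p.1 == r)) = [] := by
          rw [List.filter_eq_nil_iff]
          intro p hp
          simp only [List.mem_map] at hp
          obtain ⟨c, _, rfl⟩ := hp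
          simp; omega
        rw [List.flatMap_singleton, h2, List.append_nil]

-- modifying in-range position c of a range-indexed table changes exactly that entry
theorem pv_modify_map_range (w c : Nat) (f : Nat → List Int) (g : List Int → List Int)
    (hc : c < w) :
    ((List.range w).map f).modify c g
      = (List.range w).map (fun col => if col = c then g (f col) else f col) := by
  apply List.ext_getElem
  · simp [List.length_modify]
  · intro i h1 h2
    simp only [List.length_modify, List.length_map, List.length_range] at h1
    rw [List.getElem_modify]
    simp only [List.getElem_map, List.getElem_range]
    by_cases h : c = i
    · subst h; simp
    · simp [h, Ne.symm h]

-- distributing a flat in-range hit list into fresh column buckets = per-column filters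
theorem pv_distribute (w : Nat) (hs : List (Nat × Nat)) (hw : ∀ p ∈ hs, p.2 < w) :
    ∀ f : Nat → List Int,
    hs.foldl (fun C p => C.modify p.2 (fun xs => xs ++ [(p.1 : Int)])) ((List.range w).map f)
      = (List.range w).map (fun col =>
          f col ++ (hs.filter (fun p => p.2 == col)).map (fun p => (p.1 : Int))) := by
  induction hs with
  | nil => intro f; simp
  | cons p hs ih =>
      intro f
      have hp : p.2 < w := hw p (List.mem_cons_self)
      rw [List.foldl_cons, pv_modify_map_range w p.2 f _ hp,
        ih (fun q hq => hw q (List.mem_cons_of_mem p hq))]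
      apply List.map_congr_left
      intro col hcol
      by_cases h : p.2 = col
      · subst h; simp
      · have h' : ¬ col = p.2 := fun hh => h hh.symm
        simp [h, h']

-- fresh buckets are a constant range-indexed table
theorem pv_replicate_eq_map_range (w : Nat) :
    List.replicate w ([] : List Int) = (List.range w).map (fun _ => []) := by
  induction w with
  | zero => rfl
  | succ n ih => rw [List.range_succ, List.map_append, List.replicate_succ', ih]; rfl

-- ===== VERDICT (by name: the statement is the Claim_ definition above) =====
theorem mapObstructions_spec : Claim_equal_mapObstructions := by
  intro obstructionChar matrix _ _
  unfold Spec_mapObstructions mapObstructions mapObstructions_alt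
  simp only []
  set w := (matrix.headD []).length with hw
  set n := matrix.length with hn
  set g : Nat → List Nat := fun r =>
    (List.range w).filter (fun c => (matrix.getD r []).getD c "" == obstructionChar) with hg
  -- split A's pair-state fold into a row fold and a column fold
  rw [show
    (fun (st : List (List Int) × List (List Int)) rowNum =>
      (List.range w).foldl (fun st colNum =>
        if ((matrix.getD rowNum []).getD colNum "") == obstructionChar then
          (st.1.modify rowNum (fun xs => xs ++ [(colNum : Int)]),
           st.2.modify colNum (fun xs => xs ++ [(rowNum : Int)]))
        else st) st)
    = (fun st rowNum =>
        ((List.range w).foldl (fun R colNum =>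
            if ((matrix.getD rowNum []).getD colNum "") == obstructionChar then
              R.modify rowNum (fun xs => xs ++ [(colNum : Int)]) else R) st.1,
         (List.range w).foldl (fun C colNum =>
            if ((matrix.getD rowNum []).getD colNum "") == obstructionChar then
              C.modify colNum (fun xs => xs ++ [(rowNum : Int)]) else C) st.2))
    from by
      funext st rowNum
      rw [← pv_foldl_pair (List.range w)
        (fun R colNum =>
            if ((matrix.getD rowNum []).getD colNum "") == obstructionChar then
              R.modify rowNum (fun xs => xs ++ [(colNum : Int)]) else R)
        (fun C colNum =>
            if ((matrix.getD rowNum []).getD colNum "") == obstructionChar then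
              C.modify colNum (fun xs => xs ++ [(rowNum : Int)]) else C) st.1 st.2]
      apply PySem.List.foldl_congr_mem
      intro acc c _
      by_cases h : ((matrix.getD rowNum []).getD c "" == obstructionChar) = true
      · rw [if_pos h, if_pos h, if_pos h]
      · rw [if_neg h, if_neg h, if_neg h]]
  rw [pv_foldl_pair (List.range n)
    (fun R rowNum => (List.range w).foldl (fun R colNum =>
        if ((matrix.getD rowNum []).getD colNum "") == obstructionChar then
          R.modify rowNum (fun xs => xs ++ [(colNum : Int)]) else R) R)
    (fun C rowNum => (List.range w).foldl (fun C colNum =>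
        if ((matrix.getD rowNum []).getD colNum "") == obstructionChar then
          C.modify colNum (fun xs => xs ++ [(rowNum : Int)]) else C) C)
    (List.replicate n []) (List.replicate w [])]
  rw [Prod.mk.injEq]
  constructor
  · -- rows: A's row fold = per-row hit lists = B's row filters of the flat hit list
    have h1 : (fun (R : List (List Int)) rowNum =>
        (List.range w).foldl (fun R colNum =>
          if ((matrix.getD rowNum []).getD colNum "") == obstructionChar then
            R.modify rowNum (fun xs => xs ++ [(colNum : Int)]) else R) R)
        = (fun R rowNum => R.modify rowNum (fun xs => xs ++
            (g rowNum).map (fun (c : Nat) => (c : Int)))) := by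
      funext R rowNum
      rw [← pv_foldl_modify_same, hg]
      rw [List.foldl_map, List.foldl_filter]
    rw [h1, pv_rowfold]
    apply List.map_congr_left
    intro r hr
    rw [pv_filter_hits_row g n r (List.mem_range.mp hr)]
    rw [List.map_map]
    rfl
  · -- columns: A's column fold = distributing the flat hit list = B's column filters
    have h2 : (fun (C : List (List Int)) rowNum =>
        (List.range w).foldl (fun C colNum =>
          if ((matrix.getD rowNum []).getD colNum "") == obstructionChar then
            C.modify colNum (fun xs => xs ++ [(rowNum : Int)]) else C) C)
        = (fun C rowNum => ((g rowNum).map (fun c => (rowNum, c))).foldl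
            (fun C (p : Nat × Nat) => C.modify p.2 (fun xs => xs ++ [(p.1 : Int)])) C) := by
      funext C rowNum
      rw [List.foldl_map, hg, List.foldl_filter]
    rw [h2, ← List.foldl_flatMap, pv_replicate_eq_map_range,
      pv_distribute w _ (by
        intro p hp
        simp only [List.mem_flatMap, List.mem_range, List.mem_map, hg] at hp
        obtain ⟨r, _, c, hc, rfl⟩ := hp
        exact List.mem_range.mp (List.mem_of_mem_filter hc)) (fun _ => [])]
    simp
    intro a _
    rfl
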